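-- pv_equiv track=rewrite | github.com/kresna009/fungsionalLatihan3 | tugas3.py | map_int
-- ===== SOURCE A (Python) =====
-- def map_int(x):
--     digits = [int(d) for d in str(x)]
--     mapped_data = {}
--     for i, digit in enumerate(digits):
--         place = len(digits) - i
--         if place == 1:
--             place_name = "satuan"
--         elif place == 2:
--             place_name = "puluhan"
--         else:
--             place_name = "ratusan"
--         mapped_data[place_name] = digit
--     return mapped_data
-- ===== SOURCE B (Python) =====
-- def map_int(x):
--     digits = [int(d) for d in str(x)]
--     mapped_data = {}
--     n = len(digits)
--     if n >= 3:
--         mapped_data["ratusan"] = digits[-3]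
--     if n >= 2:
--         mapped_data["puluhan"] = digits[-2]
--     mapped_data["satuan"] = digits[-1]
--     return mapped_data
-- ===== Notes on version B (the rewrite author's own statement) =====
-- stated objective: simpler
-- what changed: B keeps A's digit parse but replaces A's per-digit loop (enumerate, place arithmetic, name branching, repeated dict overwrites) with three direct negative-index assignments satuan/puluhan/ratusan guarded by the digit count.
import Mathlib
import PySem

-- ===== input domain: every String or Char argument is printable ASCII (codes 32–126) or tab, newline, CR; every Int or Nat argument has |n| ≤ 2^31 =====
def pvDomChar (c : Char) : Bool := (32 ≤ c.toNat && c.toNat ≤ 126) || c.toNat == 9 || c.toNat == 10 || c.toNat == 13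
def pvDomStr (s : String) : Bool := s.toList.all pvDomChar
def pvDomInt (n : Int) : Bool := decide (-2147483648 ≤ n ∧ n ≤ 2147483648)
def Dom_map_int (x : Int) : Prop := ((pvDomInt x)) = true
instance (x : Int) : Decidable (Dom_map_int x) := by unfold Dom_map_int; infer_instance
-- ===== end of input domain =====

-- B replaces A's per-digit loop by three direct negative-index assignments (objective: simpler).

-- ===== PORT A =====
-- digits = [int(d) for d in str(x)]: int(d) is PySem.Int.ofChars? [d]; the getD fallback is a
-- totality guard only — Pre_map_int excludes exactly the negative x where int() raises (on '-').
def map_int (x : Int) : List (String × Int) :=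
  let digits : List Int := (PySem.Int.toChars x).map (fun d => (PySem.Int.ofChars? [d]).getD 0)
  let mapped_data : PySem.Dict String Int :=
    (PySem.List.enumerate digits 0).foldl
      (fun mapped_data p =>
        let place := PySem.List.len digits - p.1
        let place_name := if place == 1 then "satuan" else if place == 2 then "puluhan" else "ratusan"
        mapped_data.insert place_name p.2)
      PySem.Dict.empty
  mapped_data.items

-- ===== PORT B =====
-- same parse (same getD totality guard; under Pre_map_int the digits list is nonempty and
-- every pyGet? below returns some), then three direct assignments.
def map_int_alt (x : Int) : List (String × Int) :=
  let digits : List Int := (PySem.Int.toChars x).map (fun d => (PySem.Int.ofChars? [d]).getD 0)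
  let n := digits.length
  let m0 : PySem.Dict String Int := PySem.Dict.empty
  let m1 := if 3 ≤ n then m0.insert "ratusan" ((PySem.List.pyGet? digits (-3)).getD 0) else m0
  let m2 := if 2 ≤ n then m1.insert "puluhan" ((PySem.List.pyGet? digits (-2)).getD 0) else m1
  let m3 := m2.insert "satuan" ((PySem.List.pyGet? digits (-1)).getD 0)
  m3.items

-- ===== PRECONDITION & SPEC =====
-- Pre_ excludes negative x, on which Python's int('-') raises ValueError in both A and B.
def Pre_map_int (x : Int) : Prop := 0 ≤ x
instance (x : Int) : Decidable (Pre_map_int x) := by unfold Pre_map_int; infer_instance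
def pvWitness_map_int : Int := 123

def Spec_map_int (x : Int) (out : List (String × Int)) : Prop := out = map_int_alt x
instance (x : Int) (out : List (String × Int)) : Decidable (Spec_map_int x out) := by unfold Spec_map_int; infer_instance

-- ===== CLAIM (what is proved, stated in full; the proofs are below) =====
def Claim_equal_map_int : Prop := ∀ (x : Int), Dom_map_int x → Pre_map_int x → Spec_map_int x (map_int x)

-- ===== LEMMAS AND PROOFS =====

-- A's place-name branch, as a function of the place number
def pvName (pl : Int) : String :=
  if pl == 1 then "satuan" else if pl == 2 then "puluhan" else "ratusan"

-- A's loop, on an arbitrary digit list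
def pvLoop (ds : List Int) : List (String × Int) :=
  ((PySem.List.enumerate ds 0).foldl
      (fun (m : PySem.Dict String Int) p => m.insert (pvName (PySem.List.len ds - p.1)) p.2)
      PySem.Dict.empty).items

-- B's direct assembly, on an arbitrary digit list
def pvDirect (ds : List Int) : List (String × Int) :=
  let n := ds.length
  let m0 : PySem.Dict String Int := PySem.Dict.empty
  let m1 := if 3 ≤ n then m0.insert "ratusan" ((PySem.List.pyGet? ds (-3)).getD 0) else m0
  let m2 := if 2 ≤ n then m1.insert "puluhan" ((PySem.List.pyGet? ds (-2)).getD 0) else m1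
  let m3 := m2.insert "satuan" ((PySem.List.pyGet? ds (-1)).getD 0)
  m3.items

theorem pvName_of_ge (pl : Int) (h : 3 ≤ pl) : pvName pl = "ratusan" := by
  unfold pvName
  rw [if_neg (by simp; omega), if_neg (by simp; omega)]

theorem pvInsert_r (m : PySem.Dict String Int) (v : Int)
    (hm : m.items = [] ∨ ∃ w, m.items = [("ratusan", w)]) :
    m.insert "ratusan" v = PySem.Dict.mk [("ratusan", v)] := by
  rcases hm with h | ⟨w, h⟩
  · rw [PySem.Dict.ext (y := PySem.Dict.mk []) h]; rfl
  · rw [PySem.Dict.ext (y := PySem.Dict.mk [("ratusan", w)]) h]; rfl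

-- the prefix of A's loop in which every place number is ≥ 3 only ever (over)writes "ratusan"
theorem pvFront (n : Int) (l : List (Int × Int)) (m : PySem.Dict String Int)
    (hl : ∀ p ∈ l, 3 ≤ n - p.1)
    (hm : m.items = [] ∨ ∃ w, m.items = [("ratusan", w)]) :
    (l.foldl (fun (m : PySem.Dict String Int) p => m.insert (pvName (n - p.1)) p.2) m).items = [] ∨
    ∃ w, (l.foldl (fun (m : PySem.Dict String Int) p => m.insert (pvName (n - p.1)) p.2) m).items
      = [("ratusan", w)] := by
  induction l generalizing m with
  | nil => simpa using hm
  | cons p t ih =>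
    simp only [List.foldl_cons]
    apply ih
    · intro q hq; exact hl q (List.mem_cons_of_mem _ hq)
    · rw [pvName_of_ge _ (hl p (List.mem_cons_self ..)), pvInsert_r m p.2 hm]
      exact Or.inr ⟨p.2, rfl⟩

theorem pvLoop_eq_direct (ds : List Int) (hne : ds ≠ []) : pvLoop ds = pvDirect ds := by
  have hr : ds.reverse.reverse = ds := List.reverse_reverse ds
  rcases hrev : ds.reverse with _ | ⟨c, _ | ⟨b, _ | ⟨a, t⟩⟩⟩
  · exact absurd (by simpa using congrArg List.reverse hrev) hne
  · have h1 : ds = [c] := by rw [← hr, hrev]; rfl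
    subst h1; rfl
  · have h2 : ds = [b, c] := by rw [← hr, hrev]; rfl
    subst h2; rfl
  · have h3 : ds = t.reverse ++ [a, b, c] := by
      rw [← hr, hrev]; simp
    subst h3
    have hlen : PySem.List.len (t.reverse ++ [a, b, c]) = (t.reverse.length : Int) + 3 := by
      simp [PySem.List.len_eq]
    have hg1 : PySem.List.pyGet? (t.reverse ++ [a, b, c]) (-1) = some c := by
      rw [PySem.List.pyGet?_neg_one]
      simp [List.getLast?_append]
    have hg2 : PySem.List.pyGet? (t.reverse ++ [a, b, c]) (-2) = some b := by
      rw [show (-2 : Int) = -((2 : Nat) : Int) by norm_num,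
          PySem.List.pyGet?_neg_natCast _ _ (by norm_num)
            (by simp only [List.length_append, List.length_cons, List.length_nil]; omega)]
      rw [show (t.reverse ++ [a, b, c]).length - 2 = t.reverse.length + 1 by
        simp only [List.length_append, List.length_cons, List.length_nil]; omega]
      rw [List.getElem?_append_right (by omega)]
      rw [show t.reverse.length + 1 - t.reverse.length = 1 from by omega]; rfl
    have hg3 : PySem.List.pyGet? (t.reverse ++ [a, b, c]) (-3) = some a := by
      rw [show (-3 : Int) = -((3 : Nat) : Int) by norm_num,
          PySem.List.pyGet?_neg_natCast _ _ (by norm_num)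
            (by simp only [List.length_append, List.length_cons, List.length_nil]; omega)]
      rw [show (t.reverse ++ [a, b, c]).length - 3 = t.reverse.length by
        simp only [List.length_append, List.length_cons, List.length_nil]; omega]
      rw [List.getElem?_append_right (by omega)]
      rw [show t.reverse.length - t.reverse.length = 0 from by omega]; rfl
    -- left side: split the loop into the ≥3 prefix and the last three steps
    have hfront := pvFront (PySem.List.len (t.reverse ++ [a, b, c]))
      (PySem.List.enumerate t.reverse 0) PySem.Dict.empty
      (by
        intro p hp
        rw [PySem.List.mem_enumerate_iff] at hp
        obtain ⟨k, hk, rfl⟩ := hp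
        rw [hlen]; push_cast; omega)
      (Or.inl rfl)
    unfold pvLoop pvDirect
    rw [PySem.List.enumerate_append]
    simp only [PySem.List.enumerate_cons, PySem.List.enumerate_nil, List.foldl_append,
      List.foldl_cons, List.foldl_nil]
    rw [show PySem.List.len (t.reverse ++ [a, b, c]) - (0 + (t.reverse.length : Int)) = 3 by
          rw [hlen]; ring,
        show PySem.List.len (t.reverse ++ [a, b, c]) - (0 + (t.reverse.length : Int) + 1) = 2 by
          rw [hlen]; ring,
        show PySem.List.len (t.reverse ++ [a, b, c]) - (0 + (t.reverse.length : Int) + 1 + 1) = 1 by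
          rw [hlen]; ring]
    rw [show pvName 3 = "ratusan" from rfl, show pvName 2 = "puluhan" from rfl,
        show pvName 1 = "satuan" from rfl]
    rw [pvInsert_r _ a hfront]
    rw [hg1, hg2, hg3]
    rw [if_pos (by simp), if_pos (by simp)]
    rfl

theorem pvToChars_ne_nil (x : Int) : PySem.Int.toChars x ≠ [] := by
  unfold PySem.Int.toChars
  split
  · simp
  · exact List.ne_nil_of_length_pos Nat.length_toDigits_pos

-- ===== VERDICT (by name: the statement is the Claim_ definition above) =====
theorem map_int_spec : Claim_equal_map_int := by
  intro x _ _
  show map_int x = map_int_alt x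
  have hA : map_int x
      = pvLoop ((PySem.Int.toChars x).map (fun d => (PySem.Int.ofChars? [d]).getD 0)) := rfl
  have hB : map_int_alt x
      = pvDirect ((PySem.Int.toChars x).map (fun d => (PySem.Int.ofChars? [d]).getD 0)) := rfl
  rw [hA, hB]
  exact pvLoop_eq_direct _ (by simp [pvToChars_ne_nil])
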